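-- pv_equiv track=rewrite | github.com/yashwanth1k996/Computational-Programming-Course | 02-nearestkaprekarnumber-Python/nearestkaprekarnumber.py | fun_nearestkaprekarnumber
-- ===== SOURCE A (Python) =====
-- def isequal(val, n):
--     for i in range(1, len(val)):
--         if((int(val[:i]) + int(val[i:])) == n and int(val[i:]) != 0):
--             return True
--     return False
--
-- def iskaprekar(n):
--     val = n**2
--     vallen = len(str(val))
--     mid = vallen//2
--     strval = str(val)
--     if(vallen == 1):
--         if(val == n):
--             return True
--         else:
--             return False
--     if(isequal(strval, n)):
--         return True
--     else:
--         return  False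
--
-- def fun_nearestkaprekarnumber(n):
--     vallow = 0
--     valhigh = 0
--     for i in range(n, 0, -1):
--         if(iskaprekar(i)):
--             vallow = i
--             break
--     j = n+1
--     while(j > n):
--         if(iskaprekar(j)):
--             valhigh = j
--             break
--         j += 1
--     if((n-vallow) > (valhigh-n)):
--         return valhigh
--     else:
--         return vallow
-- ===== SOURCE B (Python) =====
-- def fun_nearestkaprekarnumber(n):
--     # Single outward-expanding search (radius d = 0, 1, 2, ...) testing n-d before
--     # n+d, instead of A's two directed scans plus a distance comparison; the
--     # Kaprekar test walks a prefix/suffix split across the digit string instead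
--     # of re-slicing by index. Negative candidates never pass the test (both split
--     # parts are nonnegative), so the scan lands on 0 for n <= 0, as A does.
--     def kaprekar(m):
--         sq = m * m
--         s = str(sq)
--         if len(s) == 1:
--             return sq == m
--         left, right = s[:1], s[1:]
--         while right:
--             if int(right) != 0 and int(left) + int(right) == m:
--                 return True
--             left, right = left + right[:1], right[1:]
--         return False
--
--     d = 0
--     while True:
--         if kaprekar(n - d):
--             return n - d
--         if kaprekar(n + d):
--             return n + d
--         d += 1
-- ===== Notes on version B (the rewrite author's own statement) =====
-- stated objective: alternative
-- what changed: Replaces A's two directed scans (downward for-loop plus upward while-loop, then a distance comparison) by a single outward-expanding search that for radius d = 0, 1, 2, ... tests n-d before n+d and returns the first hit (reproducing A's tie-break toward the lower number), and replaces A's index-range slicing Kaprekar test by a prefix/suffix walk that moves one character per step across the digit string.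
import Mathlib
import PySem

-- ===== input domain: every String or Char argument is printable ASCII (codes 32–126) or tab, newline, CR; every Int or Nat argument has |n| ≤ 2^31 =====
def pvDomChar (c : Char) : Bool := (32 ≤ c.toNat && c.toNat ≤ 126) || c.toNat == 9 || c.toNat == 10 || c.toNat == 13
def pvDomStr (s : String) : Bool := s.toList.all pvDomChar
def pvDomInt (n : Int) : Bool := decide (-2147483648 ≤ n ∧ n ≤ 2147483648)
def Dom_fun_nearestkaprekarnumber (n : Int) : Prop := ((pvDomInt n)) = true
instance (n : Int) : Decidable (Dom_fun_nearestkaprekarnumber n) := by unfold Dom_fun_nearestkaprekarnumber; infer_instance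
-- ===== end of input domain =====

-- B replaces A's two directed scans (downward for-loop plus upward while-loop, then a
-- distance comparison) with one outward-expanding search testing n-d before n+d, and its
-- Kaprekar test walks a prefix/suffix split across the digit string instead of A's
-- index-range slicing; objective: alternative structure, same exact results.

-- ===== PORT A =====
-- str(val) is ported as its code-point list (PySem.Int.toChars); slicing/len are the
-- exact PySem.List primitives on that list.
-- int(val[:i]) / int(val[i:]) never raise in Python here (nonempty digit substrings),
-- so the Option result of PySem.Int.ofChars? is read with getD 0 (exact on these inputs).
def pvIsequalLoop (val : List Char) (n : Int) : List Int → Bool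
  | [] => false
  | i :: rest =>
    if ((PySem.Int.ofChars? (PySem.List.slice val none (some i))).getD 0
          + (PySem.Int.ofChars? (PySem.List.slice val (some i) none)).getD 0 == n)
        && (!((PySem.Int.ofChars? (PySem.List.slice val (some i) none)).getD 0 == 0))
    then true
    else pvIsequalLoop val n rest

def isequal (val : List Char) (n : Int) : Bool :=
  pvIsequalLoop val n (PySem.List.pyRange 1 (PySem.List.len val) 1)

def iskaprekar (n : Int) : Bool :=
  let val : Int := n ^ 2
  let vallen : Int := PySem.List.len (PySem.Int.toChars val)
  let _mid : Int := PySem.Int.floordiv vallen 2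
  let strval : List Char := PySem.Int.toChars val
  if vallen == 1 then
    (if val == n then true else false)
  else
    (if isequal strval n then true else false)

-- fuel bound for A's 'while(j > n)' loop and B's 'while True' loop: within Dom the next
-- Kaprekar number is at most 10^10-1 away (the test passes at 10^10-1) and 0 is at most
-- 2^31 away, so both loops return well inside this fuel; fuel is a totality guard only.
def pvFuel : Nat := 14294967296

def pvLowLoop : List Int → Int
  | [] => 0
  | i :: rest => if iskaprekar i then i else pvLowLoop rest

def pvHighLoop : Nat → Int → Int
  | 0, _ => 0
  | fuel+1, j => if iskaprekar j then j else pvHighLoop fuel (j + 1)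

def fun_nearestkaprekarnumber (n : Int) : Int :=
  let vallow := pvLowLoop (PySem.List.pyRange n 0 (-1))
  let valhigh := pvHighLoop pvFuel (n + 1)
  if n - vallow > valhigh - n then valhigh else vallow

-- ===== PORT B =====
-- the walk: left/right hold the two split strings; the first char of right moves to
-- left each step ('left + right[:1]', 'right[1:]' = the cons pattern on right).
def pvKapWalk (m : Int) : List Char → List Char → Bool
  | _, [] => false
  | left, c :: rest =>
    if ((PySem.Int.ofChars? (c :: rest)).getD 0 != 0)
        && ((PySem.Int.ofChars? left).getD 0 + (PySem.Int.ofChars? (c :: rest)).getD 0 == m)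
    then true
    else pvKapWalk m (left ++ [c]) rest

def pvKaprekarB (m : Int) : Bool :=
  let sq := m * m
  let s := PySem.Int.toChars sq
  if s.length == 1 then sq == m
  else pvKapWalk m (PySem.List.slice s none (some 1)) (PySem.List.slice s (some 1) none)

-- outward-expanding single scan; negative candidates never pass the test.
def pvOutLoop : Nat → Int → Int → Int
  | 0, _, _ => 0
  | fuel+1, n, d =>
    if pvKaprekarB (n - d) then n - d
    else if pvKaprekarB (n + d) then n + d
    else pvOutLoop fuel n (d + 1)

def fun_nearestkaprekarnumber_alt (n : Int) : Int := pvOutLoop pvFuel n 0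

-- ===== PRECONDITION & SPEC =====
def Spec_fun_nearestkaprekarnumber (n : Int) (out : Int) : Prop := out = fun_nearestkaprekarnumber_alt n
instance (n : Int) (out : Int) : Decidable (Spec_fun_nearestkaprekarnumber n out) := by unfold Spec_fun_nearestkaprekarnumber; infer_instance

-- ===== CLAIM (what is proved, stated in full; the proofs are below) =====
def Claim_equal_fun_nearestkaprekarnumber : Prop := ∀ (n : Int), Dom_fun_nearestkaprekarnumber n → Spec_fun_nearestkaprekarnumber n (fun_nearestkaprekarnumber n)

-- ===== LEMMAS AND PROOFS =====

-- str(m^2) for m < 0 contains no '-', so both parsed substrings are ≥ 0 and can never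
-- sum to the negative m: iskaprekar is false on negatives.
lemma digitChar_ne_dash (d : Nat) (hd : d < 10) : Nat.digitChar d ≠ '-' := by
  interval_cases d <;> decide

lemma dash_not_mem_toDigitsCore (f : Nat) : ∀ (n : Nat) (acc : List Char),
    '-' ∉ acc → '-' ∉ Nat.toDigitsCore 10 f n acc := by
  induction f with
  | zero => intro n acc h; simpa [Nat.toDigitsCore] using h
  | succ f ih =>
    intro n acc h
    simp only [Nat.toDigitsCore]
    split
    · simp only [List.mem_cons, not_or]
      exact ⟨fun hc => digitChar_ne_dash _ (Nat.mod_lt _ (by omega)) hc.symm, h⟩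
    · exact ih _ _ (by
        simp only [List.mem_cons, not_or]
        exact ⟨fun hc => digitChar_ne_dash _ (Nat.mod_lt _ (by omega)) hc.symm, h⟩)

lemma dash_not_mem_toChars (v : Int) (hv : 0 ≤ v) : '-' ∉ PySem.Int.toChars v := by
  unfold PySem.Int.toChars
  rw [if_neg (by omega)]
  exact dash_not_mem_toDigitsCore _ _ _ (by simp)

lemma pvOptAux (o : Option Nat) :
    0 ≤ (Option.map (fun n : Int => n) (do let a ← o; pure ((a : Int)))).getD 0 := by
  cases o <;> simp

lemma ofChars_getD_nonneg (cs : List Char) (h : '-' ∉ cs) :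
    0 ≤ (PySem.Int.ofChars? cs).getD 0 := by
  unfold PySem.Int.ofChars?
  have hmem : '-' ∉ (((cs.dropWhile PySem.Int.isIntSpace).reverse.dropWhile PySem.Int.isIntSpace)).reverse := by
    intro hm
    apply h
    have h1 := List.dropWhile_sublist (p := PySem.Int.isIntSpace) (l := (cs.dropWhile PySem.Int.isIntSpace).reverse)
    have h2 := List.dropWhile_sublist (p := PySem.Int.isIntSpace) (l := cs)
    rw [List.mem_reverse] at hm
    exact h2.subset (by simpa using h1.subset hm)
  revert hmem
  generalize (((cs.dropWhile PySem.Int.isIntSpace).reverse.dropWhile PySem.Int.isIntSpace)).reverse = t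
  intro hmem
  simp only [letFun]
  split
  · exact absurd List.mem_cons_self hmem
  · exact pvOptAux _
  · exact pvOptAux _

lemma pvIsequalLoop_neg (val : List Char) (n : Int) (hn : n < 0) (hd : '-' ∉ val) :
    ∀ ns, pvIsequalLoop val n ns = false := by
  intro ns
  induction ns with
  | nil => rfl
  | cons i rest ih =>
    have ha : 0 ≤ (PySem.Int.ofChars? (PySem.List.slice val none (some i))).getD 0 :=
      ofChars_getD_nonneg _ (fun hm => hd (PySem.List.mem_of_mem_slice _ _ _ hm))
    have hb : 0 ≤ (PySem.Int.ofChars? (PySem.List.slice val (some i) none)).getD 0 :=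
      ofChars_getD_nonneg _ (fun hm => hd (PySem.List.mem_of_mem_slice _ _ _ hm))
    simp only [pvIsequalLoop]
    rw [if_neg, ih]
    simp only [Bool.and_eq_true, beq_iff_eq, not_and]
    intro hab
    omega

lemma iskaprekar_neg (i : Int) (h : i < 0) : iskaprekar i = false := by
  have hsq : 0 < i ^ 2 := by rw [pow_two]; exact mul_pos_of_neg_of_neg h h
  unfold iskaprekar
  simp only []
  split
  · rw [if_neg]
    simp only [beq_iff_eq]
    omega
  · rw [if_neg]
    rw [isequal]
    rw [pvIsequalLoop_neg _ _ h (dash_not_mem_toChars _ (by omega))]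
    simp

-- the bridge: B's prefix/suffix walk over str(m*m) tests exactly A's index splits.
lemma walk_eq (val : List Char) (n : Int) : ∀ (k i : Nat), k = val.length - i → i ≤ val.length →
    pvIsequalLoop val n (PySem.List.pyRange (i : Int) (val.length : Int) 1)
      = pvKapWalk n (val.take i) (val.drop i) := by
  intro k
  induction k with
  | zero =>
    intro i hk hle
    have hi : i = val.length := by omega
    subst hi
    simp [pvIsequalLoop, pvKapWalk, List.drop_length]
  | succ k ih =>
    intro i hk hle
    have hi : i < val.length := by omega
    rw [PySem.List.pyRange_one_cons (by exact_mod_cast hi)]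
    rw [List.drop_eq_getElem_cons hi]
    simp only [pvIsequalLoop, pvKapWalk]
    rw [PySem.List.slice_to_natCast, PySem.List.slice_from_natCast]
    rw [List.drop_eq_getElem_cons hi]
    have hcond : (((PySem.Int.ofChars? (val[i] :: val.drop (i + 1))).getD 0 != 0)
          && ((PySem.Int.ofChars? (val.take i)).getD 0
              + (PySem.Int.ofChars? (val[i] :: val.drop (i + 1))).getD 0 == n))
        = (((PySem.Int.ofChars? (val.take i)).getD 0
              + (PySem.Int.ofChars? (val[i] :: val.drop (i + 1))).getD 0 == n)
          && (!((PySem.Int.ofChars? (val[i] :: val.drop (i + 1))).getD 0 == 0))) :=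
      Bool.and_comm _ _
    rw [hcond]
    split
    · rfl
    · rw [show ((i : Int) + 1) = ((i + 1 : Nat) : Int) by push_cast; ring]
      rw [ih (i + 1) (by omega) (by omega)]
      rw [List.take_add_one, List.getElem?_eq_getElem hi]
      rfl

lemma toChars_len_pos (v : Int) (hv : 0 ≤ v) : 1 ≤ (PySem.Int.toChars v).length := by
  unfold PySem.Int.toChars
  rw [if_neg (by omega)]
  exact Nat.length_toDigits_pos

lemma kapB_eq (m : Int) : pvKaprekarB m = iskaprekar m := by
  unfold pvKaprekarB iskaprekar
  rw [show m ^ 2 = m * m from pow_two m]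
  simp only [PySem.List.len_eq]
  by_cases h : (PySem.Int.toChars (m * m)).length = 1
  · simp [h]
    rfl
  · rw [if_neg (by simpa using h), if_neg (by simpa using h)]
    rw [PySem.List.slice_to _ (show (0:Int) ≤ 1 by norm_num),
      PySem.List.slice_from _ (show (0:Int) ≤ 1 by norm_num)]
    rw [isequal, PySem.List.len_eq]
    have hw := walk_eq (PySem.Int.toChars (m * m)) m ((PySem.Int.toChars (m * m)).length - 1) 1 rfl
      (toChars_len_pos _ (mul_self_nonneg m))
    rw [show ((1 : Nat) : Int) = (1 : Int) from by norm_num] at hw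
    rw [show ((1 : Int)).toNat = 1 from rfl, ← hw]
    cases hc : pvIsequalLoop (PySem.Int.toChars (m * m)) m
        (PySem.List.pyRange 1 ((PySem.Int.toChars (m * m)).length : Int) 1) <;> simp

lemma iskaprekar_zero : iskaprekar 0 = true := by decide
lemma iskaprekar_one : iskaprekar 1 = true := by decide
lemma iskaprekar_big : iskaprekar 9999999999 = true := by decide

lemma low_char : ∀ (n : Int), 1 ≤ n →
    iskaprekar (pvLowLoop (PySem.List.pyRange n 0 (-1))) = true ∧
    1 ≤ pvLowLoop (PySem.List.pyRange n 0 (-1)) ∧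
    pvLowLoop (PySem.List.pyRange n 0 (-1)) ≤ n ∧
    ∀ m, pvLowLoop (PySem.List.pyRange n 0 (-1)) < m → m ≤ n → iskaprekar m = false := by
  intro n hn
  induction n, hn using Int.le_induction with
  | base =>
    rw [PySem.List.pyRange_neg_one_cons (by omega)]
    rw [PySem.List.pyRange_neg_one_eq_nil (by omega)]
    rw [show pvLowLoop [(1 : Int)] = 1 from by simp [pvLowLoop, iskaprekar_one]]
    exact ⟨iskaprekar_one, le_refl _, le_refl _, fun m h1 h2 => by omega⟩
  | succ n hn1 ih =>
    rw [PySem.List.pyRange_neg_one_cons (by omega)]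
    simp only [pvLowLoop]
    by_cases hk : iskaprekar (n + 1) = true
    · rw [if_pos hk]
      exact ⟨hk, by omega, le_refl _, fun m h1 h2 => by omega⟩
    · rw [if_neg hk]
      have : n + 1 - 1 = n := by omega
      rw [this]
      obtain ⟨k1, k2, k3, k4⟩ := ih
      refine ⟨k1, k2, by omega, ?_⟩
      intro m h1 h2
      rcases eq_or_lt_of_le h2 with h3 | h3
      · rw [h3]; simpa using hk
      · exact k4 m h1 (by omega)

lemma high_char : ∀ (f : Nat) (j m0 : Int), j ≤ m0 → iskaprekar m0 = true →
    (m0 - j).toNat < f →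
    iskaprekar (pvHighLoop f j) = true ∧ j ≤ pvHighLoop f j ∧
    ∀ m, j ≤ m → m < pvHighLoop f j → iskaprekar m = false := by
  intro f
  induction f with
  | zero => intro j m0 h1 h2 h3; omega
  | succ f ih =>
    intro j m0 h1 h2 h3
    simp only [pvHighLoop]
    by_cases hk : iskaprekar j = true
    · rw [if_pos hk]
      exact ⟨hk, le_refl _, fun m hm1 hm2 => by omega⟩
    · rw [if_neg hk]
      have hj : j < m0 := by
        rcases eq_or_lt_of_le h1 with h | h
        · exact absurd (h ▸ h2) hk
        · exact h
      obtain ⟨k1, k2, k3⟩ := ih (j + 1) m0 (by omega) h2 (by omega)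
      refine ⟨k1, by omega, ?_⟩
      intro m hm1 hm2
      rcases eq_or_lt_of_le hm1 with h | h
      · rw [← h]; simpa using hk
      · exact k3 m (by omega) hm2

lemma out_char : ∀ (f : Nat) (n d dl dh : Int), d ≤ dl → d ≤ dh →
    (∀ e, d ≤ e → e < dl → pvKaprekarB (n - e) = false) →
    (∀ e, d ≤ e → e < dl → e < dh → pvKaprekarB (n + e) = false) →
    (dl ≤ dh → pvKaprekarB (n - dl) = true) →
    (dh < dl → pvKaprekarB (n + dh) = true) →
    (min dl dh - d).toNat < f →
    pvOutLoop f n d = if dl ≤ dh then n - dl else n + dh := by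
  intro f
  induction f with
  | zero => intro n d dl dh h1 h2 _ _ _ _ hf; omega
  | succ f ih =>
    intro n d dl dh h1 h2 hlow hhigh hL hH hf
    simp only [pvOutLoop]
    by_cases hddl : d = dl
    · -- the minus check fires iff dl ≤ dh here; if dh < dl this case is impossible
      have hdldh : dl ≤ dh := by omega
      rw [hddl, if_pos (hL hdldh), if_pos hdldh]
    · have hdlt : d < dl := by omega
      rw [if_neg (by simp [hlow d (le_refl _) hdlt])]
      by_cases hddh : d = dh
      · have hdh : dh < dl := by omega
        rw [hddh, if_pos (hH hdh), if_neg (by omega)]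
      · have hdht : d < dh := by omega
        rw [if_neg (by simp [hhigh d (le_refl _) hdlt hdht])]
        exact ih n (d + 1) dl dh (by omega) (by omega)
          (fun e he1 he2 => hlow e (by omega) he2)
          (fun e he1 he2 he3 => hhigh e (by omega) he2 he3)
          hL hH (by omega)

-- ===== VERDICT (by name: the statement is the Claim_ definition above) =====
theorem fun_nearestkaprekarnumber_spec : Claim_equal_fun_nearestkaprekarnumber := by
  intro n hDom
  have hD : -2147483648 ≤ n ∧ n ≤ 2147483648 := by
    simpa [Dom_fun_nearestkaprekarnumber, pvDomInt] using hDom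
  unfold Spec_fun_nearestkaprekarnumber
  unfold fun_nearestkaprekarnumber fun_nearestkaprekarnumber_alt
  simp only []
  rcases lt_or_ge n 1 with hn | hn
  · -- n ≤ 0 : A returns 0 (empty downward range, upward scan stops at 0 or finds 1 for n=0)
    rw [PySem.List.pyRange_neg_one_eq_nil (by omega)]
    simp only [pvLowLoop]
    rcases eq_or_lt_of_le (show n ≤ 0 by omega) with hz | hneg
    · -- n = 0 : upward scan finds 1; distance comparison keeps vallow = 0; B hits 0 at d = 0
      subst hz
      obtain ⟨k1, k2, k3⟩ := high_char pvFuel (0 + 1) 1 (by omega) iskaprekar_one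
        (by unfold pvFuel; omega)
      have hH1 : pvHighLoop pvFuel (0 + 1) = 1 := by
        by_contra hc
        have h1 : 1 < pvHighLoop pvFuel (0 + 1) := by omega
        exact absurd (k3 1 (by omega) h1 ▸ iskaprekar_one) (by simp)
      rw [hH1, if_neg (by omega)]
      rw [out_char pvFuel 0 0 0 1 (by omega) (by omega)
        (fun e he1 he2 => by omega)
        (fun e he1 he2 he3 => by omega)
        (fun _ => by norm_num [kapB_eq, iskaprekar_zero])
        (fun h => absurd h (by omega))
        (by unfold pvFuel; omega)]
      norm_num
    · -- n < 0 : everything below 0 fails the test, so both sides land on 0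
      obtain ⟨k1, k2, k3⟩ := high_char pvFuel (n + 1) 0 (by omega) iskaprekar_zero
        (by unfold pvFuel; omega)
      have hH0 : pvHighLoop pvFuel (n + 1) = 0 := by
        have hle : pvHighLoop pvFuel (n + 1) ≤ 0 := by
          by_contra hc
          exact absurd (k3 0 (by omega) (by omega) ▸ iskaprekar_zero) (by simp)
        rcases eq_or_lt_of_le hle with h | h
        · exact h
        · rw [iskaprekar_neg _ h] at k1; exact absurd k1 (by simp)
      rw [hH0, if_neg (by omega)]
      rw [out_char pvFuel n 0 (1 - n) (-n) (by omega) (by omega)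
        (fun e he1 he2 => by rw [kapB_eq]; exact iskaprekar_neg _ (by omega))
        (fun e he1 he2 he3 => by rw [kapB_eq]; exact iskaprekar_neg _ (by omega))
        (fun h => absurd h (by omega))
        (fun _ => by rw [show n + -n = (0 : Int) by ring, kapB_eq]; exact iskaprekar_zero)
        (by unfold pvFuel; omega)]
      rw [if_neg (by omega)]
      omega
  · -- 1 ≤ n
    obtain ⟨l1, l2, l3, l4⟩ := low_char n hn
    set L := pvLowLoop (PySem.List.pyRange n 0 (-1)) with hLdef
    obtain ⟨h1, h2, h3⟩ := high_char pvFuel (n + 1) 9999999999 (by omega) iskaprekar_big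
      (by unfold pvFuel; omega)
    set H := pvHighLoop pvFuel (n + 1) with hHdef
    have hHm0 : H ≤ 9999999999 := by
      by_contra hc
      exact absurd (h3 9999999999 (by omega) (by omega) ▸ iskaprekar_big) (by simp)
    rw [out_char pvFuel n 0 (n - L) (H - n) (by omega) (by omega)
      (fun e he1 he2 => by rw [kapB_eq]; exact l4 (n - e) (by omega) (by omega))
      (fun e he1 he2 he3 => by
        rw [kapB_eq]
        rcases eq_or_lt_of_le he1 with h | h
        · rw [← h]; simpa using l4 n (by omega) (le_refl n)
        · exact h3 (n + e) (by omega) (by omega))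
      (fun _ => by rw [kapB_eq]; simpa using l1)
      (fun _ => by rw [kapB_eq]; simpa using h1)
      (by unfold pvFuel; omega)]
    split_ifs <;> omega
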